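-- pv_equiv track=rewrite | github.com/Nocotov77/py_gerda | 32_Самостоятельная_работа_1_на_функции/3202_Защитник/main.py | defender
-- ===== SOURCE A (Python) =====
-- def defender(lines):
--     list1 = []
--     d1 = dict()
--     for i in range(len(lines)):
--         list1.append(len(lines[i]))
--     list1 = list(dict.fromkeys(list1))
--     for i in range(len(list1)):
--         for j in range(len(lines)):
--             if list1[i] == len(lines[j]):
--                 d1[list1[i]] = d1.get(list1[i], []) + [lines[j]]
--     return d1
-- ===== SOURCE B (Python) =====
-- def defender(lines):
--     d = {}
--     for line in lines:
--         d.setdefault(len(line), []).append(line)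
--     return d
-- ===== Notes on version B (the rewrite author's own statement) =====
-- stated objective: faster
-- what changed: Replaced A's build-unique-length-index-then-rescan-all-lines-per-length (nested loops) by a single pass that appends each line to its length bucket via dict.setdefault, preserving first-occurrence key order.
import Mathlib
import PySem

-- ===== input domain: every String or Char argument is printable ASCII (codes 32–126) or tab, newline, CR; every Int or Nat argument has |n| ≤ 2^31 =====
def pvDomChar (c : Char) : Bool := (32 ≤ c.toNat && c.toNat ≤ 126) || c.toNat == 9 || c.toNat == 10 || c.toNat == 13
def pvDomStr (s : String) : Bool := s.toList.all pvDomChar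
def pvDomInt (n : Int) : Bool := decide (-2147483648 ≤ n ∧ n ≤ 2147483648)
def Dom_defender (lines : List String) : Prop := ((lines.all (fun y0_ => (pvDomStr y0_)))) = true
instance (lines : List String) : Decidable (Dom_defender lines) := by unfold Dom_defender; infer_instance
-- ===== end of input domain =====

-- B groups the lines in ONE pass (dict.setdefault buckets) instead of A's unique-length index
-- followed by a full rescan of all lines per distinct length; same return value.

-- ===== PORT A =====
def defender (lines : List String) : List (Int × List String) :=
  let list1 : List Int :=
    (PySem.List.pyRange 0 (PySem.List.len lines)).foldl
      (fun acc i => acc ++ [PySem.Str.len (PySem.List.pyGetD lines i "")]) []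
  let list1' : List Int := PySem.List.dedup list1
  let d1 : PySem.Dict Int (List String) :=
    (PySem.List.pyRange 0 (PySem.List.len list1')).foldl
      (fun d i =>
        (PySem.List.pyRange 0 (PySem.List.len lines)).foldl
          (fun d j =>
            if PySem.List.pyGetD list1' i 0 = PySem.Str.len (PySem.List.pyGetD lines j "") then
              d.insert (PySem.List.pyGetD list1' i 0)
                (d.getD (PySem.List.pyGetD list1' i 0) [] ++ [PySem.List.pyGetD lines j ""])
            else d)
          d)
      PySem.Dict.empty
  d1.items

-- ===== PORT B =====
def defender_alt (lines : List String) : List (Int × List String) :=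
  let d : PySem.Dict Int (List String) :=
    lines.foldl (fun d line => d.modify (PySem.Str.len line) [] (fun v => v ++ [line]))
      PySem.Dict.empty
  d.items

-- ===== PRECONDITION & SPEC =====
def Spec_defender (lines : List String) (out : List (Int × List String)) : Prop := out = defender_alt lines
instance (lines : List String) (out : List (Int × List String)) : Decidable (Spec_defender lines out) := by unfold Spec_defender; infer_instance

-- ===== CLAIM (what is proved, stated in full; the proofs are below) =====
def Claim_equal_defender : Prop := ∀ (lines : List String), Dom_defender lines → Spec_defender lines (defender lines)

-- ===== LEMMAS AND PROOFS =====

-- canonical form both ports are reduced to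
def pvGroups (lines : List String) : List (Int × List String) :=
  (PySem.Set.ofList (lines.map PySem.Str.len)).map
    (fun k => (k, lines.filter (fun s => PySem.Str.len s == k)))

-- A's inner loop (over one fixed length k), after the pyRange/pyGetD bridge
def pvInner (k : Int) (d : PySem.Dict Int (List String)) (lines : List String) :
    PySem.Dict Int (List String) :=
  lines.foldl
    (fun d s => if k = PySem.Str.len s then d.insert k (d.getD k [] ++ [s]) else d) d

theorem pvInner_no_match (k : Int) (d : PySem.Dict Int (List String)) (lines : List String)
    (h : ∀ s ∈ lines, PySem.Str.len s ≠ k) : pvInner k d lines = d := by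
  induction lines generalizing d with
  | nil => rfl
  | cons s rest ih =>
      have hs : PySem.Str.len s ≠ k := h s (by simp)
      simp only [pvInner] at ih ⊢
      rw [List.foldl_cons, if_neg (Ne.symm hs)]
      exact ih d (fun t ht => h t (by simp [ht]))

theorem pvInner_match (k : Int) (d : PySem.Dict Int (List String)) (lines : List String)
    (h : ∃ s ∈ lines, PySem.Str.len s = k) :
    pvInner k d lines =
      d.insert k (d.getD k [] ++ lines.filter (fun s => PySem.Str.len s == k)) := by
  induction lines generalizing d with
  | nil => simp at h
  | cons s rest ih =>
      simp only [pvInner] at ih ⊢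
      rw [List.foldl_cons, List.filter_cons]
      by_cases hs : PySem.Str.len s = k
      · rw [if_pos hs.symm, if_pos (by simp only [beq_iff_eq]; exact hs)]
        by_cases hr : ∃ t ∈ rest, PySem.Str.len t = k
        · rw [ih _ hr, PySem.Dict.getD_insert_self, PySem.Dict.insert_insert_self]
          simp
        · push Not at hr
          have hnm := pvInner_no_match k (d.insert k (d.getD k [] ++ [s])) rest hr
          simp only [pvInner] at hnm
          rw [hnm]
          have hf : rest.filter (fun s => PySem.Str.len s == k) = [] := by
            rw [List.filter_eq_nil_iff]; intro t ht; simpa using hr t ht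
          rw [hf]
      · have h' : ∃ t ∈ rest, PySem.Str.len t = k := by
          rcases h with ⟨t, ht, hk⟩
          rcases List.mem_cons.mp ht with rfl | htr
          · exact absurd hk hs
          · exact ⟨t, htr, hk⟩
        rw [if_neg (Ne.symm hs), if_neg (by simp only [beq_iff_eq]; exact hs)]
        exact ih d h'

-- A's outer loop over the distinct lengths, starting from a dict none of them is in
theorem pvOuter (lines : List String) (ks : List Int) (d : PySem.Dict Int (List String))
    (hnd : ks.Nodup) (hfresh : ∀ k ∈ ks, k ∉ d.keys)
    (hmem : ∀ k ∈ ks, ∃ s ∈ lines, PySem.Str.len s = k) :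
    (ks.foldl (fun d k => pvInner k d lines) d).items =
      d.items ++ ks.map (fun k => (k, lines.filter (fun s => PySem.Str.len s == k))) := by
  induction ks generalizing d with
  | nil => simp
  | cons k ks ih =>
      have hkd : d.contains k = false := by
        rw [PySem.Dict.contains_eq_decide_mem_keys]
        simpa using hfresh k (by simp)
      have hstep : pvInner k d lines =
          d.insert k (lines.filter (fun s => PySem.Str.len s == k)) := by
        rw [pvInner_match k d lines (hmem k (by simp)),
          PySem.Dict.getD_of_not_contains _ _ hkd]
        simp
      simp only [List.foldl_cons, hstep]
      rw [ih _ (hnd.of_cons)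
        (fun k' hk' => by
          rw [PySem.Dict.keys_insert_of_not_contains _ _ hkd]
          intro hmem'
          rcases List.mem_append.mp hmem' with h1 | h2
          · exact hfresh k' (by simp [hk']) h1
          · have : k' = k := by simpa using h2
            exact (List.nodup_cons.mp hnd).1 (this ▸ hk'))
        (fun k' hk' => hmem k' (by simp [hk']))]
      rw [PySem.Dict.items_insert_of_not_contains _ _ hkd]
      simp

theorem defender_eq_groups (lines : List String) : defender lines = pvGroups lines := by
  unfold defender
  have h0 : (0 : Int) ≤ 0 := le_refl 0
  rw [PySem.List.foldl_pyRange_pyGetD lines ""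
    (fun (acc : List Int) (s : String) => acc ++ [PySem.Str.len s]) [] h0]
  simp only [Int.toNat_zero, List.drop_zero]
  rw [PySem.List.foldl_append_singleton_eq_map]
  simp only [List.nil_append]
  set ks : List Int := PySem.List.dedup (lines.map PySem.Str.len) with hks
  rw [PySem.List.foldl_pyRange_pyGetD ks 0
    (fun (d : PySem.Dict Int (List String)) (k : Int) =>
      (PySem.List.pyRange 0 (PySem.List.len lines)).foldl
        (fun (d : PySem.Dict Int (List String)) (j : Int) =>
          if k = PySem.Str.len (PySem.List.pyGetD lines j "") then
            d.insert k (d.getD k [] ++ [PySem.List.pyGetD lines j ""])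
          else d) d)
    PySem.Dict.empty h0]
  simp only [Int.toNat_zero, List.drop_zero]
  have hin : (fun (d : PySem.Dict Int (List String)) (k : Int) =>
      (PySem.List.pyRange 0 (PySem.List.len lines)).foldl
        (fun (d : PySem.Dict Int (List String)) (j : Int) =>
          if k = PySem.Str.len (PySem.List.pyGetD lines j "") then
            d.insert k (d.getD k [] ++ [PySem.List.pyGetD lines j ""])
          else d) d) = fun d k => pvInner k d lines := by
    funext d k
    rw [PySem.List.foldl_pyRange_pyGetD lines ""
      (fun (d : PySem.Dict Int (List String)) (s : String) =>
        if k = PySem.Str.len s then d.insert k (d.getD k [] ++ [s]) else d) d h0]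
    simp [pvInner]
  rw [hin]
  have hnd : ks.Nodup := PySem.Set.nodup_ofList _
  have hmem : ∀ k ∈ ks, ∃ s ∈ lines, PySem.Str.len s = k := by
    intro k hk
    have : k ∈ lines.map PySem.Str.len := (PySem.Set.mem_ofList _ _).mp hk
    simpa [List.mem_map, eq_comm] using this
  rw [pvOuter lines ks PySem.Dict.empty hnd (by simp [PySem.Dict.keys_empty]) hmem]
  simp [pvGroups, hks, PySem.List.dedup, PySem.Dict.empty]

theorem defender_alt_eq_groups (lines : List String) : defender_alt lines = pvGroups lines := by
  unfold defender_alt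
  set d : PySem.Dict Int (List String) :=
    lines.foldl (fun d line => d.modify (PySem.Str.len line) [] (fun v => v ++ [line]))
      PySem.Dict.empty with hd
  have hkeys : d.keys = PySem.Set.ofList (lines.map PySem.Str.len) := by
    rw [hd, PySem.Dict.keys_foldl_modify_key lines PySem.Str.len []
      (fun _ line v => v ++ [line]) PySem.Dict.empty]
    rw [PySem.Dict.keys_empty]
    exact PySem.Set.update_nil_left _
  have hget : ∀ k : Int, d.getD k [] = lines.filter (fun s => PySem.Str.len s == k) := by
    intro k
    have := PySem.Dict.getD_foldl_modify_append
      (lines.map (fun s => (PySem.Str.len s, s))) (PySem.Dict.empty (κ := Int) (ν := List String)) k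
    rw [List.foldl_map] at this
    simp only [PySem.Dict.getD_empty, List.nil_append] at this
    rw [hd, this, List.filter_map, List.map_map]
    simp [Function.comp_def]
  have hnodup : d.keys.Nodup := by
    rw [hkeys]; exact PySem.Set.nodup_ofList _
  rw [PySem.Dict.items_eq_map_keys d hnodup [], hkeys, pvGroups]
  exact List.map_congr_left (fun k _ => by rw [hget k])

-- ===== VERDICT (by name: the statement is the Claim_ definition above) =====
theorem defender_spec : Claim_equal_defender := by
  intro lines _
  unfold Spec_defender
  rw [defender_eq_groups, defender_alt_eq_groups]
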